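-- pv_equiv track=rewrite | github.com/Kevinmburugitau/IKARIS | py/dyck.py | parse_S
-- ===== SOURCE A (Python) =====
-- def parse_S(s: str, i: int) -> int:
--     """
--     Parse S starting at index i.
--     Return next index after parsing S, or -1 if failure.
--     Accepts both () and [] as matching brackets.
--     """
--     # Loop to handle multiple adjacent bracketed expressions (S S)
--     while i < len(s) and s[i] in '([':
--         open_bracket = s[i]  # Current opening bracket ('(' or '[')
--         close_bracket = ')' if open_bracket == '(' else ']'  # Matching closing bracket
--         i += 1  # Move past the opening bracket
--         i = parse_S(s, i)  # Recursively parse the inner S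
--         # If parsing failed or no matching closing bracket, return failure
--         if i == -1 or i >= len(s) or s[i] != close_bracket:
--             return -1
--         i += 1  # Move past the closing bracket
--         # Continue loop to parse any trailing S (adjacent bracketed expressions)
--     return i  # Return the index after parsing S
-- ===== SOURCE B (Python) =====
-- def parse_S(s: str, i: int) -> int:
--     """Iterative single-pass scanner: explicit stack of expected closing brackets."""
--     stack = []
--     while i < len(s):
--         c = s[i]
--         if c in '([':
--             stack.append(')' if c == '(' else ']')
--             i += 1
--         elif stack and c == stack[-1]:
--             stack.pop()
--             i += 1
--         else:
--             break
--     return -1 if stack else i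
-- ===== Notes on version B (the rewrite author's own statement) =====
-- stated objective: idiomatic
-- what changed: Replaces the call-stack recursive descent (with -1 doubling as failure sentinel and index) by a flat single-pass iterative scanner keeping an explicit stack of expected closing brackets.
-- outside the precondition, e.g. on parse_S('()', -2): A returns -1, B returns 2; on parse_S('ab', -5): A raises IndexError, B raises IndexError
import Mathlib
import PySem

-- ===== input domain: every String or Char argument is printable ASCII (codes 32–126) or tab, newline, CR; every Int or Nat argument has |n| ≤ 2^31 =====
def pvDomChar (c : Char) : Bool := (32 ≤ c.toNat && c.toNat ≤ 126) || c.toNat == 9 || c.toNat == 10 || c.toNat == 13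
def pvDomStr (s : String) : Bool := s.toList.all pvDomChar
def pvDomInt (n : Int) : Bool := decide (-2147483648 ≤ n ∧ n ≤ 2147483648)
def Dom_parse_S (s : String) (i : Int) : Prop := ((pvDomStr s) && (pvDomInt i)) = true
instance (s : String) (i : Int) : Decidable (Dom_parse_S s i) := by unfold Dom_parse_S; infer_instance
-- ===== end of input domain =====

-- B replaces A's call-stack recursion by an iterative single-pass scanner with an
-- explicit stack of expected closing brackets (idiomatic restructuring, same cost).


-- ===== PORT A =====
-- termination-measure lemmas cited by name inside the ports (kept small on purpose)
theorem pvMeasureDec1 (n i : Int) (h : i < n) : (n - (i + 1)).toNat < (n - i).toNat := by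
  omega

theorem pvMeasureDec2 (n i rv : Int) (h : i < n) (hge : i + 1 ≤ rv) :
    (n - (rv + 1)).toNat < (n - i).toNat := by
  omega

theorem pvInvStep {i rv r2 : Int} (hge : i + 1 ≤ rv) (h3 : rv + 1 ≤ r2) : i ≤ r2 := by
  omega

-- Literal port of A's recursion. The `while` loop's continuation after a matched
-- closing bracket is rendered as the tail call `parseAuxA cs (rv + 1)` (same
-- function body, same state). The result carries an invariant (result = -1 or
-- result ≥ starting index) needed only for the termination measure.
def parseAuxA (cs : List Char) (i : Int) : {r : Int // r = -1 ∨ i ≤ r} :=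
  if h : i < (cs.length : Int) ∧ (PySem.List.pyGet? cs i = some '(' ∨ PySem.List.pyGet? cs i = some '[') then
    -- i = parse_S(s, i + 1)  (the result is destructured to expose the invariant
    -- needed by the termination measure)
    match parseAuxA cs (i + 1) with
    | ⟨rv, hrp⟩ =>
      -- if i == -1 or i >= len(s) or s[i] != close_bracket: return -1
      -- (close_bracket = ')' if open_bracket == '(' else ']', written inline)
      if h2 : rv = -1 ∨ (cs.length : Int) ≤ rv ∨
          PySem.List.pyGet? cs rv ≠ some (if PySem.List.pyGet? cs i = some '(' then ')' else ']') then
        ⟨-1, Or.inl rfl⟩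
      else
        -- i += 1; continue the while loop (tail call = same loop body)
        match parseAuxA cs (rv + 1) with
        | ⟨r2, hp2⟩ =>
          ⟨r2, hp2.imp id (pvInvStep (hrp.resolve_left (fun hc => h2 (Or.inl hc))))⟩
  else
    ⟨i, Or.inr le_rfl⟩
termination_by ((cs.length : Int) - i).toNat
decreasing_by
  · exact pvMeasureDec1 _ _ h.1
  · exact pvMeasureDec2 _ _ _ h.1 (hrp.resolve_left (fun hc => h2 (Or.inl hc)))

def parse_S (s : String) (i : Int) : Int := (parseAuxA s.toList i).val

-- ===== PORT B =====
-- Literal port of B: one flat loop over the index, explicit stack of expected closers.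
def scanB (cs : List Char) (stack : List Char) (i : Int) : Int :=
  if h : i < (cs.length : Int) then
    match PySem.List.pyGet? cs i with
    | none => -1  -- i out of range on the negative side: Python raises (outside Pre_)
    | some c =>
      if c = '(' ∨ c = '[' then
        scanB cs ((if c = '(' then ')' else ']') :: stack) (i + 1)
      else
        match stack with
        | [] => i                                   -- break with empty stack
        | t :: rest =>
          if c = t then scanB cs rest (i + 1)
          else -1                                   -- break with non-empty stack
  else
    if stack.isEmpty then i else -1
termination_by ((cs.length : Int) - i).toNat
decreasing_by
  · exact pvMeasureDec1 _ _ h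
  · exact pvMeasureDec1 _ _ h

def parse_S_alt (s : String) (i : Int) : Int := scanB s.toList [] i

-- ===== PRECONDITION & SPEC =====
-- Pre_ excludes negative start indices: for i < -len(s) (and any negative i on the
-- empty string) A raises IndexError, and for -len(s) ≤ i < 0 both programs' values
-- are accidental artefacts of Python's negative-index wraparound interacting with
-- the use of -1 as a failure sentinel — a corner no caller of a parser would specify.
def Pre_parse_S (s : String) (i : Int) : Prop := 0 ≤ i
instance (s : String) (i : Int) : Decidable (Pre_parse_S s i) := by unfold Pre_parse_S; infer_instance

def pvWitness_parse_S : String × Int := ("([()])[]", 0)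

def Spec_parse_S (s : String) (i : Int) (out : Int) : Prop := out = parse_S_alt s i
instance (s : String) (i : Int) (out : Int) : Decidable (Spec_parse_S s i out) := by unfold Spec_parse_S; infer_instance

-- ===== CLAIM (what is proved, stated in full; the proofs are below) =====
def Claim_equal_parse_S : Prop := ∀ (s : String) (i : Int), Dom_parse_S s i → Pre_parse_S s i → Spec_parse_S s i (parse_S s i)

-- ===== LEMMAS AND PROOFS =====

-- Equation lemmas for parseAuxA's value.
theorem parseAuxA_val_neg (cs : List Char) (i : Int)
    (h : ¬ (i < (cs.length : Int) ∧ (PySem.List.pyGet? cs i = some '(' ∨ PySem.List.pyGet? cs i = some '['))) :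
    (parseAuxA cs i).val = i := by
  rw [parseAuxA, dif_neg h]

theorem parseAuxA_val_pos (cs : List Char) (i : Int)
    (h : i < (cs.length : Int) ∧ (PySem.List.pyGet? cs i = some '(' ∨ PySem.List.pyGet? cs i = some '[')) :
    (parseAuxA cs i).val =
      (if (parseAuxA cs (i+1)).val = -1 ∨ (cs.length : Int) ≤ (parseAuxA cs (i+1)).val ∨
          PySem.List.pyGet? cs (parseAuxA cs (i+1)).val ≠
            some (if PySem.List.pyGet? cs i = some '(' then ')' else ']') then
        -1
      else (parseAuxA cs ((parseAuxA cs (i+1)).val + 1)).val) := by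
  conv_lhs => rw [parseAuxA]
  rw [dif_pos h]
  split
  next rv hrp heq =>
    rw [heq]
    have hmk : (Subtype.mk (p := fun r => r = -1 ∨ i + 1 ≤ r) rv hrp).val = rv := rfl
    rw [hmk]
    split <;> split
    all_goals rfl

-- Exit continuation: what B's scanner does from a position where A's recursion has
-- just returned (a "blocked" position: end of string or a non-opening character).
def exitE (cs : List Char) (stack : List Char) (r : Int) : Int :=
  if r = -1 then -1 else
  match stack with
  | [] => r
  | t :: rest =>
    if r < (cs.length : Int) ∧ PySem.List.pyGet? cs r = some t then
      exitE cs rest (parseAuxA cs (r + 1)).val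
    else -1

theorem exitE_neg_one (cs : List Char) (stack : List Char) :
    exitE cs stack (-1) = -1 := by
  rw [exitE.eq_def, if_pos rfl]

theorem exitE_nil (cs : List Char) (r : Int) (h : r ≠ -1) :
    exitE cs [] r = r := by
  rw [exitE.eq_def, if_neg h]

theorem exitE_cons_hit (cs : List Char) (t : Char) (rest : List Char) (r : Int)
    (h : r ≠ -1) (h2 : r < (cs.length : Int) ∧ PySem.List.pyGet? cs r = some t) :
    exitE cs (t :: rest) r = exitE cs rest (parseAuxA cs (r + 1)).val := by
  rw [exitE.eq_def, if_neg h]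
  exact if_pos h2

theorem exitE_cons_miss (cs : List Char) (t : Char) (rest : List Char) (r : Int)
    (h : r ≠ -1) (h2 : ¬ (r < (cs.length : Int) ∧ PySem.List.pyGet? cs r = some t)) :
    exitE cs (t :: rest) r = -1 := by
  rw [exitE.eq_def, if_neg h]
  exact if_neg h2

-- Main invariant: from any index i ≥ 0 and any stack, B's scanner equals A's
-- recursion followed by the exit continuation on the current stack.
theorem scanB_eq_exitE (cs : List Char) (k : Nat) :
    ∀ (i : Int) (stack : List Char), 0 ≤ i → ((cs.length : Int) - i).toNat = k →
      scanB cs stack i = exitE cs stack (parseAuxA cs i).val := by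
  induction k using Nat.strong_induction_on with
  | _ k ih =>
    intro i stack hi hk
    rw [scanB]
    by_cases hlt : i < (cs.length : Int)
    · -- i in range; cs[i] exists
      have hc : PySem.List.pyGet? cs i = some cs[i.toNat] :=
        PySem.List.pyGet?_eq_some_getElem cs hi hlt
      set c := cs[i.toNat]'(by omega) with hcdef
      by_cases hopen : c = '(' ∨ c = '['
      · -- opening bracket: A recurses; B pushes the matching closer
        have hA := parseAuxA_val_pos cs i ⟨hlt, by rw [hc]; rcases hopen with h | h <;> simp [h]⟩
        have hclose : (if PySem.List.pyGet? cs i = some '(' then ')' else ']') =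
            (if c = '(' then ')' else ']') := by
          rw [hc]; split_ifs with h1 h2 h2 <;> simp_all
        simp only [hc, dif_pos hlt, if_pos hopen]
        rw [ih (((cs.length : Int) - (i+1)).toNat) (by omega) (i+1)
          ((if c = '(' then ')' else ']') :: stack) (by omega) rfl]
        rw [hA, hclose]
        set rv := (parseAuxA cs (i+1)).val with hrv
        by_cases hfail : rv = -1 ∨ (cs.length : Int) ≤ rv ∨
            PySem.List.pyGet? cs rv ≠ some (if c = '(' then ')' else ']')
        · rw [if_pos hfail]
          by_cases hrn : rv = -1
          · rw [hrn, exitE_neg_one, exitE_neg_one]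
          · rw [exitE_cons_miss cs _ _ _ hrn (by
              rintro ⟨hg1, hg2⟩
              rcases hfail with hf | hf | hf
              · exact hrn hf
              · omega
              · exact hf hg2), exitE_neg_one]
        · rw [if_neg hfail]
          push_neg at hfail
          obtain ⟨hr1, hr2, hr3⟩ := hfail
          rw [exitE_cons_hit cs _ _ _ hr1 ⟨hr2, hr3⟩]
      · -- not an opening bracket: A returns i; B pops or breaks
        have hA : (parseAuxA cs i).val = i := by
          refine parseAuxA_val_neg cs i ?_
          rintro ⟨-, h1 | h1⟩ <;> rw [hc] at h1 <;>
            exact hopen (by rcases not_or.mp hopen with ⟨g1, g2⟩ <;> simp_all)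
        rw [hA]
        simp only [hc, dif_pos hlt, if_neg hopen]
        match stack with
        | [] =>
          rw [exitE_nil cs i (by omega)]
        | t :: rest =>
          by_cases hct : c = t
          · simp only [if_pos hct]
            rw [ih (((cs.length : Int) - (i+1)).toNat) (by omega) (i+1) rest (by omega) rfl]
            rw [exitE_cons_hit cs t rest i (by omega) ⟨hlt, by rw [hc, hct]⟩]
          · simp only [if_neg hct]
            rw [exitE_cons_miss cs t rest i (by omega)
              (by rw [hc]; rintro ⟨-, h1⟩; exact hct (by simpa using h1))]
    · -- i ≥ length: A returns i; B exits the loop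
      have hA : (parseAuxA cs i).val = i :=
        parseAuxA_val_neg cs i (by rintro ⟨h1, -⟩; omega)
      rw [dif_neg hlt, hA]
      match stack with
      | [] => rw [exitE_nil cs i (by omega)]; rfl
      | t :: rest =>
        rw [exitE_cons_miss cs t rest i (by omega) (by rintro ⟨h1, -⟩; omega)]
        rfl

-- ===== VERDICT (by name: the statement is the Claim_ definition above) =====
theorem parse_S_spec : Claim_equal_parse_S := by
  intro s i _ hpre
  unfold Spec_parse_S parse_S parse_S_alt
  rw [scanB_eq_exitE s.toList (((s.toList.length : Int) - i).toNat) i [] hpre rfl]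
  by_cases h : (parseAuxA s.toList i).val = -1
  · rw [h, exitE_neg_one]
  · rw [exitE_nil _ _ h]
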